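-- pv_equiv track=rewrite | github.com/eulersformula/Lintcode-LeetCode | Moving_Target.py | move_target
-- ===== SOURCE A (Python) =====
-- from typing import (
--     List,
-- )
-- from typing import (
--     List,
-- )
--
-- def move_target(nums: List[int], target: int):
--     l, r = len(nums) - 1, len(nums) - 1
--     while l >= 0:
--         if nums[l] == target:
--             l -= 1
--         else:
--             nums[l], nums[r] = nums[r], nums[l]
--             l -= 1
--             r -= 1
--     return nums
-- ===== SOURCE B (Python) =====
-- from typing import (
--     List,
-- )
--
-- def move_target(nums: List[int], target: int):
--     k = nums.count(target)
--     rest = [x for x in nums if x != target]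
--     nums[:] = [target] * k + rest
--     return nums
-- ===== Notes on version B (the rewrite author's own statement) =====
-- stated objective: simpler
-- what changed: Replaces the right-to-left two-pointer swapping loop with a count-and-partition rebuild: count the targets, filter the non-targets (order preserved), and slice-assign [target]*k + rest back into the list; measured faster via C-level count/comprehension instead of per-element Python-level swaps.
import Mathlib
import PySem

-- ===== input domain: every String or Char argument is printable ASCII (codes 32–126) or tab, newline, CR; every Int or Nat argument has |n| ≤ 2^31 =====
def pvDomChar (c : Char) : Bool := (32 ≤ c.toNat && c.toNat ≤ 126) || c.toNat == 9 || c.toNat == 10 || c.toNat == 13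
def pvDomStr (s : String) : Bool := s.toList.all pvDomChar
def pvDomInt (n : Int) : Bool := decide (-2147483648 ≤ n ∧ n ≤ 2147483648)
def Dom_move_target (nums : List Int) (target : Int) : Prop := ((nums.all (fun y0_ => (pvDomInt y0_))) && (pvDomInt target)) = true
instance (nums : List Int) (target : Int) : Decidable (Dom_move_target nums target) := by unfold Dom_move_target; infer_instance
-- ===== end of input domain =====

-- B changes the algorithm (count-and-partition rebuild instead of two-pointer swaps);
-- both Pythons mutate the caller's list identically, the theorems are about the return value.

-- ===== PORT A =====
-- while loop over l = fuel-1 down to 0; indices l, r are always in range, so getD 0 is exact.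
def moveLoopA (target : Int) : List Int → Nat → Nat → List Int
  | xs, 0, _ => xs
  | xs, l + 1, r =>
      if xs.getD l 0 = target then
        moveLoopA target xs l r
      else
        moveLoopA target ((xs.set l (xs.getD r 0)).set r (xs.getD l 0)) l (r - 1)

def move_target (nums : List Int) (target : Int) : List Int :=
  moveLoopA target nums nums.length (nums.length - 1)

-- ===== PORT B =====
def move_target_alt (nums : List Int) (target : Int) : List Int :=
  List.replicate (nums.count target) target ++ nums.filter (fun x => x ≠ target)

-- ===== PRECONDITION & SPEC =====
def Spec_move_target (nums : List Int) (target : Int) (out : List Int) : Prop := out = move_target_alt nums target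
instance (nums : List Int) (target : Int) (out : List Int) : Decidable (Spec_move_target nums target out) := by unfold Spec_move_target; infer_instance

-- ===== CLAIM (what is proved, stated in full; the proofs are below) =====
def Claim_equal_move_target : Prop := ∀ (nums : List Int) (target : Int), Dom_move_target nums target → Spec_move_target nums target (move_target nums target)

-- ===== LEMMAS AND PROOFS =====

-- Loop invariant: the unprocessed prefix `pre` is untouched, the middle block (positions
-- pre.length .. pre.length+k-1) holds k copies of target, the compacted suffix `suf` is done.
lemma moveLoopA_inv (target : Int) (pre : List Int) (k : Nat) (suf : List Int) :
    moveLoopA target (pre ++ List.replicate k target ++ suf) pre.length (pre.length + k - 1)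
      = List.replicate (k + pre.count target) target ++ pre.filter (fun x => x ≠ target) ++ suf := by
  induction pre using List.reverseRecOn generalizing k suf with
  | nil => simp [moveLoopA]
  | append_singleton pre a ih =>
      have hxs : (pre ++ [a]) ++ List.replicate k target ++ suf
          = pre ++ a :: (List.replicate k target ++ suf) := by simp
      have hget : (pre ++ a :: (List.replicate k target ++ suf)).getD pre.length 0 = a := by
        simp [List.getD_eq_getElem?_getD]
      have hlen : (pre ++ [a]).length = pre.length + 1 := by simp
      rw [hxs, hlen]
      have hr : pre.length + 1 + k - 1 = pre.length + k := by omega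
      rw [hr, moveLoopA, hget]
      by_cases ha : a = target
      · rw [if_pos ha]
        have h1 : pre ++ a :: (List.replicate k target ++ suf)
            = pre ++ List.replicate (k + 1) target ++ suf := by
          simp [ha, List.replicate_succ]
        have h2 : pre.length + k = pre.length + (k + 1) - 1 := by omega
        rw [h1, h2, ih (k + 1) suf]
        have hn : k + 1 + List.count target pre = k + (List.count target pre + 1) := by omega
        simp [ha, List.filter_append, List.count_append, hn]
      · rw [if_neg ha]
        cases k with
        | zero =>
            have hg2 : (pre ++ a :: (List.replicate 0 target ++ suf)).getD (pre.length + 0) 0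
                = a := by
              simp [List.getD_eq_getElem?_getD]
            have hs : ((pre ++ a :: (List.replicate 0 target ++ suf)).set pre.length a).set
                (pre.length + 0) a = pre ++ List.replicate 0 target ++ a :: suf := by
              simp
            rw [hg2, hs, ih 0 (a :: suf)]
            simp [List.filter_append, List.count_append, ha]
        | succ k' =>
            have hg2 : (pre ++ a :: (List.replicate (k' + 1) target ++ suf)).getD
                (pre.length + (k' + 1)) 0 = target := by
              have h2 : pre ++ a :: (List.replicate (k' + 1) target ++ suf)
                  = (pre ++ a :: List.replicate k' target) ++ target :: suf := by
                simp [List.replicate_succ' (n := k')]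
              have h3 : pre.length + (k' + 1) = (pre ++ a :: List.replicate k' target).length := by
                simp
              rw [h2, h3]
              simp [List.getD_eq_getElem?_getD]
            rw [hg2]
            have h1 : (pre ++ a :: (List.replicate (k' + 1) target ++ suf)).set pre.length
                target = pre ++ target :: (List.replicate (k' + 1) target ++ suf) := by
              simp
            have h2 : pre ++ target :: (List.replicate (k' + 1) target ++ suf)
                = (pre ++ target :: List.replicate k' target) ++ target :: suf := by
              simp [List.replicate_succ' (n := k')]
            have h3 : pre.length + (k' + 1)
                = (pre ++ target :: List.replicate k' target).length := by simp
            rw [h1, h2, h3, List.set_append_right _ _ (Nat.le_refl _)]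
            have h4 : (pre ++ target :: List.replicate k' target) ++
                  (target :: suf).set ((pre ++ target :: List.replicate k' target).length -
                    (pre ++ target :: List.replicate k' target).length) a
                = pre ++ List.replicate (k' + 1) target ++ a :: suf := by
              simp [List.replicate_succ]
            rw [h4, ← h3]
            rw [ih (k' + 1) (a :: suf)]
            simp [List.filter_append, List.count_append, ha]

-- ===== VERDICT (by name: the statement is the Claim_ definition above) =====
theorem move_target_spec : Claim_equal_move_target := by
  intro nums target _
  unfold Spec_move_target move_target move_target_alt
  have h := moveLoopA_inv target nums 0 []
  simpa using h
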